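-- pv_equiv track=rewrite | github.com/tkim1205/Lyricaster | src/song_order.py | match_song_to_order
-- ===== SOURCE A (Python) =====
-- from typing import List, Dict, Tuple
--
-- def match_song_to_order(song_name: str, order_dict: Dict[str, List[str]]) -> List[str]:
--     """
--     Find matching order for a song name (fuzzy matching).
--     """
--     song_name_lower = song_name.lower().strip()
--
--     # Exact match first
--     for name, order in order_dict.items():
--         if name.lower().strip() == song_name_lower:
--             return order
--
--     # Partial match (song name contains or is contained)
--     for name, order in order_dict.items():
--         name_lower = name.lower().strip()
--         if name_lower in song_name_lower or song_name_lower in name_lower: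
--             return order
--
--     # Word-based matching
--     song_words = set(song_name_lower.split())
--     best_match = None
--     best_score = 0
--
--     for name, order in order_dict.items():
--         name_words = set(name.lower().split())
--         common = len(song_words & name_words)
--         if common > best_score:
--             best_score = common
--             best_match = order
--
--     if best_score >= 2:  # At least 2 words match
--         return best_match
--
--     return None
-- ===== SOURCE B (Python) =====
-- def match_song_to_order(song_name, order_dict):
--     sl = song_name.lower().strip()
--     sw = set(sl.split())
--     exact = partial = best = None
--     have_exact = have_partial = False
--     score = 0
--     for name, order in order_dict.items():
--         nl = name.lower().strip()
--         if not have_exact and nl == sl: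
--             exact, have_exact = order, True
--         if not have_partial and (nl in sl or sl in nl):
--             partial, have_partial = order, True
--         common = len(sw & set(name.lower().split()))
--         if common > score:
--             best, score = order, common
--     if have_exact:
--         return exact
--     if have_partial:
--         return partial
--     if score >= 2:
--         return best
--     return None
-- ===== Notes on version B (the rewrite author's own statement) =====
-- stated objective: alternative
-- what changed: Replaces A's three sequential scans (exact, then partial, then word-overlap) by a single pass over the items that maintains first-exact, first-partial and best-word-score slots, resolving the priority after the loop.
import Mathlib
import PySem

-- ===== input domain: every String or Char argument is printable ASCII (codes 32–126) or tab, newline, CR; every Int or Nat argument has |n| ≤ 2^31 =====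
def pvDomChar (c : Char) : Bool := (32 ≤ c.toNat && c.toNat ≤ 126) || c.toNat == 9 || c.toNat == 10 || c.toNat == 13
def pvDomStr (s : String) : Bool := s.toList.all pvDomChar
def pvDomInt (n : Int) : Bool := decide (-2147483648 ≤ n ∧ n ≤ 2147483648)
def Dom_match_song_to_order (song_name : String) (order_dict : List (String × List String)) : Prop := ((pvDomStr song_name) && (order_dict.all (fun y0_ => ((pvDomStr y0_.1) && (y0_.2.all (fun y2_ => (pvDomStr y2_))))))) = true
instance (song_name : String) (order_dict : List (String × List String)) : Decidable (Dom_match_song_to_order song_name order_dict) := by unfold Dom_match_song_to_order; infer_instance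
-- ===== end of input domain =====

-- B replaces A's three sequential scans by one pass with three result slots; alternative decomposition, same cost.

-- ===== PORT A =====
-- first loop of A: first exact stripped-lowercase match
def pvExactA (sl : String) : List (String × List String) → Option (List String)
  | [] => none
  | (name, order) :: rest =>
    if PySem.Str.strip (PySem.Str.lower name) == sl then some order
    else pvExactA sl rest

-- second loop of A: first containment match
def pvPartialA (sl : String) : List (String × List String) → Option (List String)
  | [] => none
  | (name, order) :: rest =>
    let nl := PySem.Str.strip (PySem.Str.lower name)
    if PySem.Str.isIn nl sl || PySem.Str.isIn sl nl then some order
    else pvPartialA sl rest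

-- third loop of A: best word-overlap score (strict >)
def pvWordA (sw : PySem.Set String) :
    List (String × List String) → Option (List String) × Nat → Option (List String) × Nat
  | [], st => st
  | (name, order) :: rest, (best, score) =>
    let nw := PySem.Set.ofList (PySem.Str.split₀ (PySem.Str.lower name))
    let common := (PySem.Set.inter sw nw).length
    if common > score then pvWordA sw rest (some order, common)
    else pvWordA sw rest (best, score)

def match_song_to_order (song_name : String) (order_dict : List (String × List String)) : Option (List String) :=
  let sl := PySem.Str.strip (PySem.Str.lower song_name)
  match pvExactA sl order_dict with
  | some o => some o
  | none =>
    match pvPartialA sl order_dict with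
    | some o => some o
    | none =>
      let sw := PySem.Set.ofList (PySem.Str.split₀ sl)
      let (best, score) := pvWordA sw order_dict (none, 0)
      if score ≥ 2 then best else none

-- ===== PORT B =====
-- one step of B's single pass: state = (exact slot, partial slot, best match, best score)
def pvStepB (sl : String) (sw : PySem.Set String)
    (st : Option (List String) × Option (List String) × Option (List String) × Nat)
    (item : String × List String) :
    Option (List String) × Option (List String) × Option (List String) × Nat :=
  let (ex, pa, best, score) := st
  let nl := PySem.Str.strip (PySem.Str.lower item.1)
  let ex' := if ex.isNone && nl == sl then some item.2 else ex
  let pa' := if pa.isNone && (PySem.Str.isIn nl sl || PySem.Str.isIn sl nl) then some item.2 else pa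
  let common := (PySem.Set.inter sw (PySem.Set.ofList (PySem.Str.split₀ (PySem.Str.lower item.1)))).length
  if common > score then (ex', pa', some item.2, common) else (ex', pa', best, score)

def match_song_to_order_alt (song_name : String) (order_dict : List (String × List String)) : Option (List String) :=
  let sl := PySem.Str.strip (PySem.Str.lower song_name)
  let sw := PySem.Set.ofList (PySem.Str.split₀ sl)
  let (ex, pa, best, score) := order_dict.foldl (pvStepB sl sw) (none, none, none, 0)
  match ex with
  | some o => some o
  | none =>
    match pa with
    | some o => some o
    | none => if score ≥ 2 then best else none

-- ===== PRECONDITION & SPEC =====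
def Spec_match_song_to_order (song_name : String) (order_dict : List (String × List String)) (out : Option (List String)) : Prop := out = match_song_to_order_alt song_name order_dict
instance (song_name : String) (order_dict : List (String × List String)) (out : Option (List String)) : Decidable (Spec_match_song_to_order song_name order_dict out) := by unfold Spec_match_song_to_order; infer_instance

-- ===== CLAIM (what is proved, stated in full; the proofs are below) =====
def Claim_equal_match_song_to_order : Prop := ∀ (song_name : String) (order_dict : List (String × List String)), Dom_match_song_to_order song_name order_dict → Spec_match_song_to_order song_name order_dict (match_song_to_order song_name order_dict)

-- ===== LEMMAS AND PROOFS =====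

-- the exact slot of B's fold is A's first-loop result (or the already-set slot)
theorem pvFold_fst (sl : String) (sw : PySem.Set String)
    (l : List (String × List String)) (ex pa best : Option (List String)) (score : Nat) :
    (l.foldl (pvStepB sl sw) (ex, pa, best, score)).1
      = match ex with | some o => some o | none => pvExactA sl l := by
  induction l generalizing ex pa best score with
  | nil => cases ex <;> rfl
  | cons hd tl ih =>
    simp only [List.foldl_cons, pvStepB, pvExactA]
    cases ex with
    | some o => simp only [Option.isNone_some, Bool.false_and]
                split <;> simpa using ih _ _ _ _
    | none =>
      simp only [Option.isNone_none, Bool.true_and]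
      by_cases h : (PySem.Str.strip (PySem.Str.lower hd.1) == sl) = true
      · obtain ⟨n, o⟩ := hd
        simp only at h
        simp only [h, if_pos]
        split <;> simpa [h] using ih _ _ _ _
      · obtain ⟨n, o⟩ := hd
        simp only at h
        rw [if_neg h]
        simp only [h, if_false, Bool.false_eq_true]
        split <;> simpa [h] using ih _ _ _ _

-- the partial slot of B's fold is A's second-loop result (or the already-set slot)
theorem pvFold_snd (sl : String) (sw : PySem.Set String)
    (l : List (String × List String)) (ex pa best : Option (List String)) (score : Nat) :
    (l.foldl (pvStepB sl sw) (ex, pa, best, score)).2.1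
      = match pa with | some o => some o | none => pvPartialA sl l := by
  induction l generalizing ex pa best score with
  | nil => cases pa <;> rfl
  | cons hd tl ih =>
    simp only [List.foldl_cons, pvStepB, pvPartialA]
    cases pa with
    | some o => simp only [Option.isNone_some, Bool.false_and]
                split <;> simpa using ih _ _ _ _
    | none =>
      simp only [Option.isNone_none, Bool.true_and]
      obtain ⟨n, o⟩ := hd
      by_cases h : (PySem.Str.isIn (PySem.Str.strip (PySem.Str.lower n)) sl
                    || PySem.Str.isIn sl (PySem.Str.strip (PySem.Str.lower n))) = true
      · simp only [h, if_true]
        split <;> simpa [h] using ih _ _ _ _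
      · simp only [h, if_false, Bool.false_eq_true]
        split <;> simpa using ih _ _ _ _

-- the word slots of B's fold follow A's third loop exactly
theorem pvFold_word (sl : String) (sw : PySem.Set String)
    (l : List (String × List String)) (ex pa best : Option (List String)) (score : Nat) :
    (l.foldl (pvStepB sl sw) (ex, pa, best, score)).2.2
      = pvWordA sw l (best, score) := by
  induction l generalizing ex pa best score with
  | nil => rfl
  | cons hd tl ih =>
    obtain ⟨n, o⟩ := hd
    simp only [List.foldl_cons, pvStepB, pvWordA]
    split <;> exact ih _ _ _ _

-- ===== VERDICT (by name: the statement is the Claim_ definition above) =====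
theorem match_song_to_order_spec : Claim_equal_match_song_to_order := by
  intro song_name order_dict _
  show match_song_to_order song_name order_dict = match_song_to_order_alt song_name order_dict
  simp only [match_song_to_order, match_song_to_order_alt]
  have h1 := pvFold_fst (PySem.Str.strip (PySem.Str.lower song_name))
      (PySem.Set.ofList (PySem.Str.split₀ (PySem.Str.strip (PySem.Str.lower song_name))))
      order_dict none none none 0
  have h2 := pvFold_snd (PySem.Str.strip (PySem.Str.lower song_name))
      (PySem.Set.ofList (PySem.Str.split₀ (PySem.Str.strip (PySem.Str.lower song_name))))
      order_dict none none none 0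
  have h3 := pvFold_word (PySem.Str.strip (PySem.Str.lower song_name))
      (PySem.Set.ofList (PySem.Str.split₀ (PySem.Str.strip (PySem.Str.lower song_name))))
      order_dict none none none 0
  generalize hst : List.foldl (pvStepB (PySem.Str.strip (PySem.Str.lower song_name))
      (PySem.Set.ofList (PySem.Str.split₀ (PySem.Str.strip (PySem.Str.lower song_name)))))
      (none, none, none, 0) order_dict = st at h1 h2 h3 ⊢
  obtain ⟨ex, pa, best, score⟩ := st
  simp only at h1 h2 h3
  rw [h1, h2, ← h3]
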